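-- pv_equiv track=rewrite | github.com/jenny-jione/programmers | KAKAO/2019_KAKAO_INTERNSHIP_WINTER/crane_machine.py | solution
-- ===== SOURCE A (Python) =====
-- def solution(board, moves):
--     answer = 0
--     n = len(board)
--     new_board = [[] for _ in range(n)]
--     basket = []
--     for i in range(n):
--         for j in range(n):
--             if board[j][i] != 0:
--                 new_board[i].insert(0, board[j][i])
--
--     for move in moves:
--         if new_board[move-1]:
--             pick = new_board[move-1].pop()
--             if not basket:
--                 basket.append(pick)
--             else:
--                 if basket[-1] == pick:
--                     basket.pop()
--                     answer += 2
--                 else: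
--                     basket.append(pick)
--     return answer
-- ===== SOURCE B (Python) =====
-- def solution(board, moves):
--     n = len(board)
--     ptr = [0] * n          # per-column downward pointer into the untouched board
--     basket = []
--     answer = 0
--     for move in moves:
--         col = move - 1
--         i = ptr[col]
--         while i < n and board[i][col] == 0:
--             i += 1
--         if i < n:
--             pick = board[i][col]
--             ptr[col] = i + 1
--             if basket and basket[-1] == pick:
--                 basket.pop()
--                 answer += 2
--             else:
--                 basket.append(pick)
--     return answer
-- ===== Notes on version B (the rewrite author's own statement) =====
-- stated objective: simpler
-- what changed: B drops A's whole board-transposing preprocessing pass (new_board built with insert(0,...)) and instead keeps one downward pointer per column into the untouched board, skipping zeros lazily at each move; Pre_ restricts to the puzzle's domain (rows at least n long, moves in 1..n): outside it A raises IndexError or relies on accidental negative-index wraparound, where the two programs can disagree.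
-- outside the precondition, e.g. on solution([[1, 2, 5], [1, 2, 7]], [0, 0]): A returns 2, B returns 0; on solution([[1, 2], [3]], [1]): A raises IndexError, B returns 0; on solution([[0, 1], [1, 1]], [3]): A raises IndexError, B raises IndexError
import Mathlib
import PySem

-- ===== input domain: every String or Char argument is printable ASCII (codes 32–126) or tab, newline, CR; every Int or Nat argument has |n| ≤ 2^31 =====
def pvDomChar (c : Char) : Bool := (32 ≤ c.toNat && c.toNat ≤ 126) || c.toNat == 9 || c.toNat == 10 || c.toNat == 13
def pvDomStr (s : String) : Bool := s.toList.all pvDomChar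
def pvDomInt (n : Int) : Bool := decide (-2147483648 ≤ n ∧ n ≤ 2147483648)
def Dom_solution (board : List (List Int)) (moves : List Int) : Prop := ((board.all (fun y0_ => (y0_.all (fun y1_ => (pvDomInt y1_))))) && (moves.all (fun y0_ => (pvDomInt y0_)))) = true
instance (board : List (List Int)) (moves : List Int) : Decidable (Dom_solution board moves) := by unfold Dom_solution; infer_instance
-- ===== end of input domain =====

-- B replaces A's board-transposing preprocessing (new_board) by one lazy downward
-- pointer per column into the untouched board; same basket logic, same cost class.

-- shared: Python index resolution (negative = from the end; none = IndexError),
-- and cell access board[j][c] (the getD defaults are only reachable where the Python raises)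
def pvIdx? (len : Nat) (i : Int) : Option Nat :=
  if 0 ≤ i then (if i < (len : Int) then some i.toNat else none)
  else (if -(len : Int) ≤ i then some ((len : Int) + i).toNat else none)

def pvCell (board : List (List Int)) (j c : Nat) : Int := (board.getD j []).getD c 0

-- ===== PORT A =====
-- new_board[i] built by insert(0, board[j][i]) over j in range(n)
def pvBuildCol (board : List (List Int)) (n i : Nat) : List Int :=
  (List.range n).foldl (fun acc j => if pvCell board j i ≠ 0 then pvCell board j i :: acc else acc) []

-- one move of A's loop; basket kept top-at-head (Python appends/pops at the end)
def pvStepA (st : List (List Int) × List Int × Int) (m : Int) : List (List Int) × List Int × Int :=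
  match pvIdx? st.1.length (m - 1) with
  | none => st                                   -- Python raises here (outside Pre_)
  | some k =>
    let col := st.1.getD k []
    match col.getLast? with
    | none => st                                 -- empty column: skip
    | some pick =>
      let nb' := st.1.set k col.dropLast         -- .pop()
      match st.2.1 with
      | [] => (nb', [pick], st.2.2)
      | b :: bs => if b = pick then (nb', bs, st.2.2 + 2) else (nb', pick :: b :: bs, st.2.2)

def solution (board : List (List Int)) (moves : List Int) : Int :=
  let n := board.length
  let nb := (List.range n).map (fun i => pvBuildCol board n i)
  (moves.foldl pvStepA (nb, [], 0)).2.2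

-- ===== PORT B =====
-- board[i][mi] with mi the raw (possibly negative) Python column index, resolved per row
def pvRowCell (board : List (List Int)) (mi : Int) (i : Nat) : Int :=
  let row := board.getD i []
  match pvIdx? row.length mi with
  | some c => row.getD c 0
  | none => 0                                    -- Python raises here (outside Pre_)

-- while i < n and f i == 0: i += 1   (f = the current cell reader)
def pvScan (f : Nat → Int) (n i : Nat) : Nat :=
  if h : i < n then (if f i = 0 then pvScan f n (i + 1) else i) else i
termination_by n - i

def pvStepB (board : List (List Int)) (n : Nat) (st : List Nat × List Int × Int) (m : Int) :
    List Nat × List Int × Int :=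
  match pvIdx? st.1.length (m - 1) with
  | none => st                                   -- Python raises here (outside Pre_)
  | some k =>
    let i := pvScan (pvRowCell board (m - 1)) n (st.1.getD k 0)
    if i < n then
      let pick := pvRowCell board (m - 1) i
      let ptr' := st.1.set k (i + 1)
      match st.2.1 with
      | [] => (ptr', [pick], st.2.2)
      | b :: bs => if b = pick then (ptr', bs, st.2.2 + 2) else (ptr', pick :: b :: bs, st.2.2)
    else st

def solution_alt (board : List (List Int)) (moves : List Int) : Int :=
  let n := board.length
  (moves.foldl (pvStepB board n) (List.replicate n 0, [], 0)).2.2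

-- ===== PRECONDITION & SPEC =====
-- Pre_ keeps the puzzle's domain: a row shorter than n or a move outside [1-n, n] makes the
-- Python A raise IndexError; a move ≤ 0 (accidental negative-index wraparound) is kept only
-- on exactly-square boards — with rows longer than n, A's wraparound into the truncated
-- new_board and B's per-row wraparound pick different cells, an artefact nobody would specify.
def Pre_solution (board : List (List Int)) (moves : List Int) : Prop :=
  (∀ row ∈ board, board.length ≤ row.length) ∧
  (∀ m ∈ moves, 1 - (board.length : Int) ≤ m ∧ m ≤ (board.length : Int)) ∧
  ((∃ m ∈ moves, m ≤ 0) → ∀ row ∈ board, row.length = board.length)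
instance (board : List (List Int)) (moves : List Int) : Decidable (Pre_solution board moves) := by
  unfold Pre_solution; infer_instance

def pvWitness_solution : List (List Int) × List Int :=
  ([[0, 0, 0], [1, 2, 0], [3, 2, 1]], [3, 2, 2, 1, 1, 3])

def Spec_solution (board : List (List Int)) (moves : List Int) (out : Int) : Prop := out = solution_alt board moves
instance (board : List (List Int)) (moves : List Int) (out : Int) : Decidable (Spec_solution board moves out) := by unfold Spec_solution; infer_instance

-- ===== CLAIM (what is proved, stated in full; the proofs are below) =====
def Claim_equal_solution : Prop := ∀ (board : List (List Int)) (moves : List Int), Dom_solution board moves → Pre_solution board moves → Spec_solution board moves (solution board moves)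

-- ===== LEMMAS AND PROOFS =====

-- the list of nonzero cells of column c, rows i..n-1, in row order
def pvColT (board : List (List Int)) (n c i : Nat) : List Int :=
  (List.range' i (n - i)).foldr (fun j acc => if pvCell board j c = 0 then acc else pvCell board j c :: acc) []

lemma pvColT_ge (board : List (List Int)) (n c i : Nat) (h : n ≤ i) : pvColT board n c i = [] := by
  simp [pvColT, Nat.sub_eq_zero_of_le h]

lemma pvColT_step (board : List (List Int)) (n c i : Nat) (h : i < n) :
    pvColT board n c i =
      (if pvCell board i c = 0 then pvColT board n c (i + 1)
       else pvCell board i c :: pvColT board n c (i + 1)) := by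
  have : n - i = (n - (i + 1)) + 1 := by omega
  rw [pvColT, this, List.range'_succ]
  by_cases hc : pvCell board i c = 0 <;> simp [hc, pvColT]

lemma pvScan_congr (f g : Nat → Int) (n : Nat) :
    ∀ i, (∀ j, i ≤ j → j < n → f j = g j) → pvScan f n i = pvScan g n i := by
  suffices H : ∀ fuel i, n - i ≤ fuel → (∀ j, i ≤ j → j < n → f j = g j) →
      pvScan f n i = pvScan g n i from fun i => H (n - i) i le_rfl
  intro fuel
  induction fuel with
  | zero =>
    intro i hf _
    have h : ¬ i < n := by omega
    conv_lhs => rw [pvScan]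
    conv_rhs => rw [pvScan]
    rw [dif_neg h, dif_neg h]
  | succ fl ih =>
    intro i hf hfg
    by_cases h : i < n
    · conv_lhs => rw [pvScan]
      conv_rhs => rw [pvScan]
      rw [dif_pos h, dif_pos h, hfg i le_rfl h]
      by_cases hc : g i = 0
      · rw [if_pos hc, if_pos hc]
        exact ih (i + 1) (by omega) (fun j hj => hfg j (by omega))
      · rw [if_neg hc, if_neg hc]
    · conv_lhs => rw [pvScan]
      conv_rhs => rw [pvScan]
      rw [dif_neg h, dif_neg h]

lemma pvScan_spec (board : List (List Int)) (n c : Nat) :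
    ∀ i, (pvScan (fun j => pvCell board j c) n i < n →
        pvCell board (pvScan (fun j => pvCell board j c) n i) c ≠ 0 ∧
        i ≤ pvScan (fun j => pvCell board j c) n i ∧
        pvColT board n c i = pvCell board (pvScan (fun j => pvCell board j c) n i) c ::
          pvColT board n c (pvScan (fun j => pvCell board j c) n i + 1))
      ∧ (¬ pvScan (fun j => pvCell board j c) n i < n → pvColT board n c i = []) := by
  suffices H : ∀ fuel i, n - i ≤ fuel →
      ((pvScan (fun j => pvCell board j c) n i < n →
        pvCell board (pvScan (fun j => pvCell board j c) n i) c ≠ 0 ∧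
        i ≤ pvScan (fun j => pvCell board j c) n i ∧
        pvColT board n c i = pvCell board (pvScan (fun j => pvCell board j c) n i) c ::
          pvColT board n c (pvScan (fun j => pvCell board j c) n i + 1))
      ∧ (¬ pvScan (fun j => pvCell board j c) n i < n → pvColT board n c i = [])) from
    fun i => H (n - i) i le_rfl
  intro fuel
  induction fuel with
  | zero =>
    intro i hf
    have h : ¬ i < n := by omega
    rw [pvScan, dif_neg h]
    exact ⟨fun hh => absurd hh h, fun _ => pvColT_ge board n c i (by omega)⟩
  | succ f ih =>
    intro i hf
    by_cases h : i < n
    · by_cases hc : pvCell board i c = 0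
      · rw [pvScan, dif_pos h, if_pos hc]
        have ihs := ih (i + 1) (by omega)
        constructor
        · intro hlt
          obtain ⟨h1, h2, h3⟩ := ihs.1 hlt
          exact ⟨h1, by omega, by rw [pvColT_step board n c i h, if_pos hc]; exact h3⟩
        · intro hge
          rw [pvColT_step board n c i h, if_pos hc]; exact ihs.2 hge
      · rw [pvScan, dif_pos h, if_neg hc]
        exact ⟨fun _ => ⟨hc, le_refl i, by rw [pvColT_step board n c i h, if_neg hc]⟩,
               fun hh => absurd h hh⟩
    · rw [pvScan, dif_neg h]
      exact ⟨fun hh => absurd hh h, fun _ => pvColT_ge board n c i (by omega)⟩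

-- foldl with cons-accumulation is the reversed filtered list
lemma pvFoldl_cons_rev (board : List (List Int)) (c : Nat) :
    ∀ (l : List Nat) (acc : List Int),
      l.foldl (fun acc j => if pvCell board j c ≠ 0 then pvCell board j c :: acc else acc) acc =
      (l.foldr (fun j r => if pvCell board j c = 0 then r else pvCell board j c :: r) []).reverse ++ acc := by
  intro l
  induction l with
  | nil => simp
  | cons j t ih =>
    intro acc
    simp only [List.foldl_cons, List.foldr_cons]
    by_cases hc : pvCell board j c = 0
    · rw [if_neg (by simp [hc]), if_pos hc, ih]
    · rw [if_pos hc, if_neg hc, ih]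
      simp

lemma pvBuildCol_eq (board : List (List Int)) (n c : Nat) :
    pvBuildCol board n c = (pvColT board n c 0).reverse := by
  rw [pvBuildCol, pvColT, List.range_eq_range', Nat.sub_zero, pvFoldl_cons_rev, List.append_nil]

lemma pvGetD_set_self {α : Type} (l : List α) (k : Nat) (v d : α) (h : k < l.length) :
    (l.set k v).getD k d = v := by
  simp [List.getD_eq_getElem?_getD, List.getElem?_set_self h]

lemma pvGetD_set_ne {α : Type} (l : List α) (k c : Nat) (v d : α) (h : c ≠ k) :
    (l.set k v).getD c d = l.getD c d := by
  simp [List.getD_eq_getElem?_getD, List.getElem?_set_ne (fun hh => h hh.symm)]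

-- the invariant linking A's materialised stacks with B's pointers
def pvRel (board : List (List Int)) (n : Nat) (nb : List (List Int)) (ptr : List Nat) : Prop :=
  nb.length = n ∧ ptr.length = n ∧
  ∀ c, c < n → nb.getD c [] = (pvColT board n c (ptr.getD c 0)).reverse

lemma pvIdx?_lt {len : Nat} {i : Int} {k : Nat} (h : pvIdx? len i = some k) : k < len := by
  unfold pvIdx? at h
  split_ifs at h with h1 h2 h3 <;> simp_all <;> omega

-- under Pre_, Python's per-row resolution of the raw column index picks column k
lemma pvRowCell_eq_cell (board : List (List Int)) (m : Int) (k : Nat)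
    (hrows : ∀ row ∈ board, board.length ≤ row.length)
    (hsq : m ≤ 0 → ∀ row ∈ board, row.length = board.length)
    (hm : m ≤ (board.length : Int))
    (hk : pvIdx? board.length (m - 1) = some k) :
    ∀ i, i < board.length → pvRowCell board (m - 1) i = pvCell board i k := by
  intro i hi
  have hmem : board.getD i [] ∈ board := by
    rw [List.getD_eq_getElem?_getD, List.getElem?_eq_getElem hi]
    exact List.getElem_mem hi
  rw [pvRowCell, pvCell]
  by_cases hpos : 0 ≤ m - 1
  · have hlen := hrows _ hmem
    have hk' : k = (m - 1).toNat := by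
      unfold pvIdx? at hk; rw [if_pos hpos, if_pos (by omega)] at hk; exact (Option.some.injEq _ _).mp hk.symm
    have : pvIdx? (board.getD i []).length (m - 1) = some k := by
      unfold pvIdx?; rw [if_pos hpos, if_pos (by omega), hk']
    rw [this]
  · have hlen := hsq (by omega) _ hmem
    rw [hlen, hk]

lemma pvStep_eq (board : List (List Int)) (n : Nat) (nb : List (List Int)) (ptr : List Nat)
    (bk : List Int) (ans : Int) (m : Int) (hrel : pvRel board n nb ptr)
    (hcell : ∀ k, pvIdx? n (m - 1) = some k → ∀ i, i < n → pvRowCell board (m - 1) i = pvCell board i k) :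
    pvRel board n (pvStepA (nb, bk, ans) m).1 (pvStepB board n (ptr, bk, ans) m).1 ∧
    (pvStepA (nb, bk, ans) m).2 = (pvStepB board n (ptr, bk, ans) m).2 := by
  obtain ⟨hlen, hplen, hcols⟩ := hrel
  unfold pvStepA pvStepB
  simp only [hlen, hplen]
  cases hk : pvIdx? n (m - 1) with
  | none => exact ⟨⟨hlen, hplen, hcols⟩, rfl⟩
  | some k =>
    dsimp only
    have hkn : k < n := pvIdx?_lt hk
    have hscanEq : pvScan (pvRowCell board (m - 1)) n (ptr.getD k 0) =
        pvScan (fun j => pvCell board j k) n (ptr.getD k 0) :=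
      pvScan_congr _ _ n _ (fun j _ hj => hcell k hk j hj)
    rw [hscanEq]
    have hcol : nb.getD k [] = (pvColT board n k (ptr.getD k 0)).reverse := hcols k hkn
    have hscan := pvScan_spec board n k (ptr.getD k 0)
    by_cases hlt : pvScan (fun j => pvCell board j k) n (ptr.getD k 0) < n
    · obtain ⟨hne, hle, hT⟩ := hscan.1 hlt
      set j := pvScan (fun j => pvCell board j k) n (ptr.getD k 0) with hj
      rw [hcell k hk j hlt]
      have hcol' : nb.getD k [] = (pvColT board n k (j + 1)).reverse ++ [pvCell board j k] := by
        rw [hcol, hT]; simp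
      have hlast : (nb.getD k []).getLast? = some (pvCell board j k) := by
        rw [hcol']; simp
      have hdrop : (nb.getD k []).dropLast = (pvColT board n k (j + 1)).reverse := by
        rw [hcol']; simp
      have hrel' : pvRel board n (nb.set k ((nb.getD k []).dropLast)) (ptr.set k (j + 1)) := by
        refine ⟨by simp [hlen], by simp [hplen], fun c hc => ?_⟩
        by_cases hck : c = k
        · subst hck
          rw [pvGetD_set_self _ _ _ _ (by omega), pvGetD_set_self _ _ _ _ (by omega), hdrop]
        · rw [pvGetD_set_ne _ _ _ _ _ hck, pvGetD_set_ne _ _ _ _ _ hck]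
          exact hcols c hc
      rw [hlast, if_pos hlt]
      cases bk with
      | nil => exact ⟨hrel', rfl⟩
      | cons b bs =>
        dsimp only
        by_cases hb : b = pvCell board j k
        · rw [if_pos hb, if_pos hb]
          exact ⟨hrel', rfl⟩
        · rw [if_neg hb, if_neg hb]
          exact ⟨hrel', rfl⟩
    · have hT := hscan.2 hlt
      have hnone : (nb.getD k []).getLast? = none := by rw [hcol, hT]; simp
      rw [hnone, if_neg hlt]
      exact ⟨⟨hlen, hplen, hcols⟩, rfl⟩

lemma pvLoop_eq (board : List (List Int)) (n : Nat) :
    ∀ (moves : List Int) (nb : List (List Int)) (ptr : List Nat) (bk : List Int) (ans : Int),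
      pvRel board n nb ptr →
      (∀ m ∈ moves, ∀ k, pvIdx? n (m - 1) = some k →
        ∀ i, i < n → pvRowCell board (m - 1) i = pvCell board i k) →
      (moves.foldl pvStepA (nb, bk, ans)).2.2 =
      (moves.foldl (pvStepB board n) (ptr, bk, ans)).2.2 := by
  intro moves
  induction moves with
  | nil => intro nb ptr bk ans _ _; rfl
  | cons m t ih =>
    intro nb ptr bk ans hrel hmv
    have h := pvStep_eq board n nb ptr bk ans m hrel (hmv m (by simp))
    simp only [List.foldl_cons]
    have hA : pvStepA (nb, bk, ans) m =
        ((pvStepA (nb, bk, ans) m).1, (pvStepA (nb, bk, ans) m).2.1, (pvStepA (nb, bk, ans) m).2.2) := rfl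
    have hB : pvStepB board n (ptr, bk, ans) m =
        ((pvStepB board n (ptr, bk, ans) m).1, (pvStepB board n (ptr, bk, ans) m).2.1,
         (pvStepB board n (ptr, bk, ans) m).2.2) := rfl
    rw [hA, hB, h.2]
    exact ih _ _ _ _ h.1 (fun m' hm' => hmv m' (List.mem_cons_of_mem _ hm'))

lemma pvRel_init (board : List (List Int)) (n : Nat) :
    pvRel board n ((List.range n).map (fun i => pvBuildCol board n i)) (List.replicate n 0) := by
  refine ⟨by simp, by simp, fun c hc => ?_⟩
  rw [List.getD_eq_getElem?_getD, List.getElem?_map, List.getElem?_range hc]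
  simp [pvBuildCol_eq, List.getD_eq_getElem?_getD, hc]

-- ===== VERDICT (by name: the statement is the Claim_ definition above) =====
theorem solution_spec : Claim_equal_solution := by
  intro board moves _ hpre
  obtain ⟨hrows, hmv, hsq⟩ := hpre
  unfold Spec_solution solution solution_alt
  refine pvLoop_eq board board.length moves _ _ [] 0 (pvRel_init board board.length) ?_
  intro m hm k hk i hi
  exact pvRowCell_eq_cell board m k hrows
    (fun hm0 => hsq ⟨m, hm, hm0⟩) (hmv m hm).2 hk i hi
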